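-- pv_equiv track=rewrite | github.com/pypi-data/pypi-mirror-357 | packages/algozen/algozen-1.2.2-py3-none-any.whl/algozen/patterns/tree_patterns.py | tree_hash
-- ===== SOURCE A (Python) =====
-- from typing import List, Optional, Dict, Tuple
--
-- def tree_hash(adj: List[List[int]], root: int = 0) -> int:
--     """Compute hash of rooted tree.
--
--     Time Complexity: O(n)
--     Space Complexity: O(n)
--     """
--     MOD = 10**9 + 7
--     BASE = 31
--
--     def dfs(u: int, p: int) -> int:
--         hash_val = 1
--         child_hashes = []
--
--         for v in adj[u]:
--             if v != p:
--                 child_hashes.append(dfs(v, u))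
--
--         child_hashes.sort()
--
--         for child_hash in child_hashes:
--             hash_val = (hash_val * BASE + child_hash) % MOD
--
--         return hash_val
--
--     return dfs(root, -1)
-- ===== SOURCE B (Python) =====
-- def tree_hash(adj, root=0):
--     """Iterative two-pass re-implementation: an explicit-stack DFS records
--     (node, parent) frames in visit order, then a reverse scan resolves each
--     frame's hash children-first via a frame-keyed dict (no recursion)."""
--     MOD = 10**9 + 7
--     BASE = 31
--     # pass 1: explicit-stack DFS, recording frames in visit order
--     order = []
--     stack = [(root, -1)]
--     while stack:
--         u, p = stack.pop()
--         order.append((u, p))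
--         for v in adj[u]:
--             if v != p:
--                 stack.append((v, u))
--     # pass 2: children appear after their parent in `order`, so a reverse
--     # scan sees every child's hash before its parent needs it
--     hashes = {}
--     for u, p in reversed(order):
--         hs = sorted(hashes[(v, u)] for v in adj[u] if v != p)
--         h = 1
--         for c in hs:
--             h = (h * BASE + c) % MOD
--         hashes[(u, p)] = h
--     return hashes[(root, -1)]
-- ===== Notes on version B (the rewrite author's own statement) =====
-- stated objective: alternative
-- what changed: A's recursive DFS is replaced by an explicit-stack two-pass iteration: pass 1 records (node, parent) frames in visit order, pass 2 scans the frames in reverse so children are resolved before their parent and stores each frame's sort-then-fold hash in a frame-keyed dict; no recursion, so B also survives depths where CPython's recursion limit would stop A.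
import Mathlib
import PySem

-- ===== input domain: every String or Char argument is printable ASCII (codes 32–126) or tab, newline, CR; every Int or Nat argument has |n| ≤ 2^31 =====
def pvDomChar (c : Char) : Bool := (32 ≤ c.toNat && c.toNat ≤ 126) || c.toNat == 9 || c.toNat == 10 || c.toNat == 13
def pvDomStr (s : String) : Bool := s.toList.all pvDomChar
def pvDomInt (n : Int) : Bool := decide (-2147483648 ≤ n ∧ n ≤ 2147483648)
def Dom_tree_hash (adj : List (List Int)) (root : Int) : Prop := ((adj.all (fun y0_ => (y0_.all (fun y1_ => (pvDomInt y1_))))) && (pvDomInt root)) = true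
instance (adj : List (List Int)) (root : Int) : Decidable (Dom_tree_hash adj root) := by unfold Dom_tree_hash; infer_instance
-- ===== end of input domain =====

-- B re-implements A's recursive DFS as an explicit-stack two-pass iteration (alternative
-- decomposition, no recursion); equivalence is proved on the inputs of Pre_, where A's
-- recursion terminates.

-- fuel budget: strictly more than the number of distinct DFS frames (v, u) any run can
-- visit (one per occurrence of a vertex label in a row, counted for both the nonnegative
-- and the negative alias of the row index, plus the root frame)
def pvC (adj : List (List Int)) : Nat :=
  2 * (adj.map List.length).sum + 2 * adj.length + 4

-- ===== PORT A =====
-- `for v in adj[u]: if v != p: child_hashes.append(dfs(v, u))` — the child-collecting loop;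
-- `g` is the recursive call at the smaller fuel.
def kidsA (g : Int → Option Int) (p : Int) : List Int → Option (List Int)
  | [] => some []
  | v :: vs =>
    if v ≠ p then
      match g v with
      | none => none
      | some h =>
        match kidsA g p vs with
        | none => none
        | some t => some (h :: t)
    else kidsA g p vs

-- dfs(u, p); recursion depth of any terminating run is < pvC adj (distinct frames on a
-- call path), so fuel pvC adj + 1 never runs out where the Python returns;
-- `none` = IndexError or fuel exhaustion, outside Pre_.
def dfsA (adj : List (List Int)) : Nat → Int → Int → Option Int
  | 0, _, _ => none
  | f + 1, u, p =>
    match PySem.List.pyGet? adj u with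
    | none => none
    | some row =>
      match kidsA (fun v => dfsA adj f v u) p row with
      | none => none
      | some ch =>
        some ((PySem.List.sorted ch (fun x => x) false).foldl
          (fun h c => PySem.Int.mod (h * 31 + c) (10 ^ 9 + 7)) 1)

def tree_hash (adj : List (List Int)) (root : Int) : Int :=
  (dfsA adj (pvC adj + 1) root (-1)).getD 0

-- ===== PORT B =====
-- pass 1: `while stack: u,p = stack.pop(); order.append((u,p)); push children`.
-- The Lean stack keeps the top at the head, so the children pushed in adj order are
-- prepended reversed; `ord` accumulates the order reversed and is reversed at the end.
-- A terminating run pops at most (pvC adj + 2)^(pvC adj + 2) frames (branching ≤ pvC,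
-- depth < pvC), so this fuel never runs out where the Python returns.
def pass1 (adj : List (List Int)) :
    Nat → List (Int × Int) → List (Int × Int) → Option (List (Int × Int))
  | _, [], ord => some ord.reverse
  | 0, _ :: _, _ => none
  | f + 1, (u, p) :: rest, ord =>
    match PySem.List.pyGet? adj u with
    | none => none
    | some row =>
      pass1 adj f
        (((row.filter (fun v => v ≠ p)).map (fun v => (v, u))).reverse ++ rest)
        ((u, p) :: ord)

-- pass 2: `for u,p in reversed(order): hashes[(u,p)] = fold(sorted(hashes[(v,u)] …))`;
-- the argument list is already `order.reverse`; `none` = KeyError/IndexError (never on Pre_).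
def pass2 (adj : List (List Int)) :
    List (Int × Int) → PySem.Dict (Int × Int) Int → Option (PySem.Dict (Int × Int) Int)
  | [], d => some d
  | (u, p) :: rest, d =>
    match PySem.List.pyGet? adj u with
    | none => none
    | some row =>
      match (row.filter (fun v => v ≠ p)).mapM (fun v => d.get? (v, u)) with
      | none => none
      | some hs =>
        pass2 adj rest
          (d.insert (u, p)
            ((PySem.List.sorted hs (fun x => x) false).foldl
              (fun h c => PySem.Int.mod (h * 31 + c) (10 ^ 9 + 7)) 1))

def tree_hash_alt (adj : List (List Int)) (root : Int) : Int :=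
  match pass1 adj ((pvC adj + 2) ^ (pvC adj + 2)) [(root, -1)] [] with
  | none => 0
  | some ord =>
    match pass2 adj ord.reverse PySem.Dict.empty with
    | none => 0
    | some d => (d.get? (root, -1)).getD 0

-- ===== PRECONDITION & SPEC =====
-- The row Python's adj[u] denotes for an in-range index u (negative u counts from the end).
def pvRow (adj : List (List Int)) (u : Int) : List Int :=
  adj.getD (if u < 0 then (u + adj.length).toNat else u.toNat) []

-- One closure step on DFS frames (u, p): add every child frame (v, u) with v ≠ p of each
-- in-range frame already collected.
def pvStep (adj : List (List Int)) (T : List (Int × Int)) : List (Int × Int) :=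
  T.foldl (fun acc fr =>
    if -(adj.length : Int) ≤ fr.1 ∧ fr.1 < (adj.length : Int) then
      (pvRow adj fr.1).foldl
        (fun acc2 v => if v ≠ fr.2 then PySem.Set.add acc2 (v, fr.1) else acc2) acc
    else acc) T

-- All frames A's recursion can reach from (root, -1).
def pvR (adj : List (List Int)) (root : Int) : List (Int × Int) :=
  (pvStep adj)^[pvC adj] [(root, -1)]

-- Longest-path height of each frame in the frame graph, computed by pvC rounds of
-- Bellman-style relaxation over the reachable frames (saturates if there is a cycle).
def pvHstep (adj : List (List Int)) (R : List (Int × Int))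
    (h : List ((Int × Int) × Nat)) : List ((Int × Int) × Nat) :=
  R.map (fun fr => (fr,
    if -(adj.length : Int) ≤ fr.1 ∧ fr.1 < (adj.length : Int) then
      ((pvRow adj fr.1).filter (fun v => decide (v ≠ fr.2))).foldl
        (fun m v => max m (((h.lookup (v, fr.1)).getD 0) + 1)) 0
    else 0))

def pvH (adj : List (List Int)) (root : Int) (fr : Int × Int) : Nat :=
  (((pvHstep adj (pvR adj root))^[pvC adj] []).lookup fr).getD 0

-- Pre_ is exactly the closed-form shape of the inputs on which A's recursion returns:
-- root is a valid index, every frame the DFS reaches has an in-range vertex (no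
-- IndexError), and the reachable frame graph carries a strictly decreasing height
-- certificate (so the mutual parent-skip recursion cannot cycle and A terminates).
def Pre_tree_hash (adj : List (List Int)) (root : Int) : Prop :=
  -(adj.length : Int) ≤ root ∧ root < adj.length ∧
  (root, -1) ∈ pvR adj root ∧
  ∀ fr ∈ pvR adj root,
    (-(adj.length : Int) ≤ fr.1 ∧ fr.1 < adj.length) ∧
    pvH adj root fr < pvC adj ∧
    ∀ v ∈ pvRow adj fr.1, v ≠ fr.2 →
      (v, fr.1) ∈ pvR adj root ∧ pvH adj root (v, fr.1) < pvH adj root fr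

instance (adj : List (List Int)) (root : Int) : Decidable (Pre_tree_hash adj root) := by
  unfold Pre_tree_hash; infer_instance

def pvWitness_tree_hash : List (List Int) × Int := ([[1], [0, 2], [1]], 0)

def Spec_tree_hash (adj : List (List Int)) (root : Int) (out : Int) : Prop := out = tree_hash_alt adj root
instance (adj : List (List Int)) (root : Int) (out : Int) : Decidable (Spec_tree_hash adj root out) := by unfold Spec_tree_hash; infer_instance

-- ===== CLAIM (what is proved, stated in full; the proofs are below) =====
def Claim_equal_tree_hash : Prop := ∀ (adj : List (List Int)) (root : Int), Dom_tree_hash adj root → Pre_tree_hash adj root → Spec_tree_hash adj root (tree_hash adj root)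

-- ===== LEMMAS AND PROOFS =====

theorem pv_witness_ok :
    Dom_tree_hash pvWitness_tree_hash.1 pvWitness_tree_hash.2 ∧
    Pre_tree_hash pvWitness_tree_hash.1 pvWitness_tree_hash.2 := by decide

-- ---- proof-side abbreviations ----

-- the children of frame (u, p): non-parent entries of the row, in row order
def pvCh (adj : List (List Int)) (u p : Int) : List Int :=
  (pvRow adj u).filter (fun v => decide (v ≠ p))

-- the sort-then-fold hashing step shared by both programs
def pvFold (hs : List Int) : Int :=
  (PySem.List.sorted hs (fun x => x) false).foldl
    (fun h c => PySem.Int.mod (h * 31 + c) (10 ^ 9 + 7)) 1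

-- generic Option-collecting loop (the shape of kidsA / mapM / expF recursions)
def gatherPf {α β : Type} (g : α → Option β) : List α → Option (List β)
  | [] => some []
  | x :: xs =>
    match g x with
    | none => none
    | some y =>
      match gatherPf g xs with
      | none => none
      | some t => some (y :: t)

-- the frame sequence pass 1 produces from one frame (children expanded in pop order)
def expF (adj : List (List Int)) : Nat → Int × Int → Option (List (Int × Int))
  | 0, _ => none
  | d + 1, (u, p) =>
    match gatherPf (fun v => expF adj d (v, u)) (pvCh adj u p).reverse with
    | none => none
    | some ls => some ((u, p) :: ls.flatten)

def pvVal (adj : List (List Int)) (u p : Int) : Int :=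
  (dfsA adj (pvC adj + 1) u p).getD 0

def pvExp (adj : List (List Int)) (fr : Int × Int) : List (Int × Int) :=
  (expF adj (pvC adj + 1) fr).getD []

-- children occur after their frame in every decomposition of the list
def SelfC (adj : List (List Int)) (l : List (Int × Int)) : Prop :=
  ∀ l1 fr l2, l = l1 ++ fr :: l2 → ∀ v ∈ pvCh adj fr.1 fr.2, (v, fr.1) ∈ l2

-- ---- gatherPf lemmas ----

theorem gatherPf_some_of {α β : Type} {g : α → Option β} {l : List α} (F : α → β)
    (h : ∀ x ∈ l, g x = some (F x)) : gatherPf g l = some (l.map F) := by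
  induction l with
  | nil => simp [gatherPf]
  | cons x xs ih =>
    simp only [gatherPf, h x (by simp), ih (fun a ha => h a (by simp [ha])), List.map_cons]

theorem gatherPf_ex {α β : Type} {g : α → Option β} {l : List α}
    (h : ∀ x ∈ l, ∃ y, g x = some y) : ∃ ys, gatherPf g l = some ys := by
  induction l with
  | nil => exact ⟨[], rfl⟩
  | cons x xs ih =>
    obtain ⟨y, hy⟩ := h x (by simp)
    obtain ⟨ys, hys⟩ := ih (fun a ha => h a (by simp [ha]))
    exact ⟨y :: ys, by simp [gatherPf, hy, hys]⟩

theorem gatherPf_congr {α β : Type} {g g' : α → Option β} {l : List α} {ys : List β}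
    (hg : ∀ x ∈ l, ∀ y, g x = some y → g' x = some y)
    (h : gatherPf g l = some ys) : gatherPf g' l = some ys := by
  induction l generalizing ys with
  | nil => simpa using h
  | cons x xs ih =>
    simp only [gatherPf] at h ⊢
    cases hx : g x with
    | none => simp [hx] at h
    | some y =>
      rw [hx] at h
      cases hxs : gatherPf g xs with
      | none => simp [hxs] at h
      | some t =>
        rw [hxs] at h
        rw [hg x (by simp) y hx, ih (fun a ha => hg a (by simp [ha])) hxs]
        exact h

theorem gatherPf_mem_tgt {α β : Type} {g : α → Option β} {l : List α} {ys : List β}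
    (h : gatherPf g l = some ys) : ∀ y ∈ ys, ∃ x ∈ l, g x = some y := by
  induction l generalizing ys with
  | nil => simp [gatherPf] at h; subst h; simp
  | cons x xs ih =>
    simp only [gatherPf] at h
    cases hx : g x with
    | none => simp [hx] at h
    | some y =>
      rw [hx] at h
      cases hxs : gatherPf g xs with
      | none => simp [hxs] at h
      | some t =>
        rw [hxs] at h
        simp only [Option.some.injEq] at h
        subst h
        intro z hz
        rcases List.mem_cons.mp hz with hz | hz
        · exact ⟨x, by simp, by simp [hx, hz]⟩
        · obtain ⟨a, ha, hga⟩ := ih hxs z hz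
          exact ⟨a, by simp [ha], hga⟩

theorem gatherPf_mem_src {α β : Type} {g : α → Option β} {l : List α} {ys : List β}
    (h : gatherPf g l = some ys) : ∀ x ∈ l, ∃ y ∈ ys, g x = some y := by
  induction l generalizing ys with
  | nil => simp
  | cons x xs ih =>
    simp only [gatherPf] at h
    cases hx : g x with
    | none => simp [hx] at h
    | some y =>
      rw [hx] at h
      cases hxs : gatherPf g xs with
      | none => simp [hxs] at h
      | some t =>
        rw [hxs] at h
        simp only [Option.some.injEq] at h
        subst h
        intro a ha
        rcases List.mem_cons.mp ha with ha | ha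
        · exact ⟨y, by simp, by simp [ha, hx]⟩
        · obtain ⟨z, hz, hgz⟩ := ih hxs a ha
          exact ⟨z, by simp [hz], hgz⟩

theorem gatherPf_eq_mapM {α β : Type} (g : α → Option β) (l : List α) :
    l.mapM g = gatherPf g l := by
  induction l with
  | nil => rfl
  | cons x xs ih =>
    simp only [List.mapM_cons, gatherPf, ih]
    cases g x
    · simp
    · simp
      cases gatherPf g xs <;> rfl

theorem gatherPf_length {α β : Type} {g : α → Option β} {l : List α} {ys : List β}
    (h : gatherPf g l = some ys) : ys.length = l.length := by
  induction l generalizing ys with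
  | nil => simp [gatherPf] at h; subst h; rfl
  | cons x xs ih =>
    simp only [gatherPf] at h
    cases hx : g x with
    | none => simp [hx] at h
    | some y =>
      rw [hx] at h
      cases hxs : gatherPf g xs with
      | none => simp [hxs] at h
      | some t =>
        rw [hxs] at h
        simp only [Option.some.injEq] at h
        subst h
        simp [ih hxs]

theorem kidsA_eq_gather (g : Int → Option Int) (p : Int) (l : List Int) :
    kidsA g p l = gatherPf g (l.filter (fun v => decide (v ≠ p))) := by
  induction l with
  | nil => rfl
  | cons v vs ih =>
    by_cases hv : v ≠ p
    · simp only [kidsA, if_pos hv, List.filter_cons, ih]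
      simp [hv, gatherPf]
      cases g v
      · rfl
      · cases gatherPf g (List.filter (fun v => !decide (v = p)) vs) <;> rfl
    · simp only [kidsA, if_neg hv, List.filter_cons]
      rw [decide_eq_false hv]
      simpa using ih

-- ---- facts from Pre_ ----

theorem pvRow_get {adj : List (List Int)} {u : Int}
    (h0 : -(adj.length : Int) ≤ u) (h1 : u < adj.length) :
    PySem.List.pyGet? adj u = some (pvRow adj u) := by
  by_cases hneg : u < 0
  · have hk0 : 0 < (-u).toNat := by omega
    have hkl : (-u).toNat ≤ adj.length := by omega
    have hu : u = -(((-u).toNat : Nat) : Int) := by omega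
    rw [hu, PySem.List.pyGet?_neg_natCast adj (-u).toNat hk0 hkl]
    have h2 : adj.length - (-u).toNat < adj.length := by omega
    rw [List.getElem?_eq_getElem h2]
    unfold pvRow
    rw [if_pos (by omega : -(((-u).toNat : Nat) : Int) < 0)]
    have h3 : (-(((-u).toNat : Nat) : Int) + adj.length).toNat = adj.length - (-u).toNat := by
      omega
    rw [h3, List.getD_eq_getElem adj [] h2]
  · have h2 : u.toNat < adj.length := by omega
    rw [PySem.List.pyGet?_of_nonneg _ (by omega)]
    unfold pvRow
    rw [if_neg hneg]
    rw [List.getElem?_eq_getElem h2, List.getD_eq_getElem adj [] h2]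

theorem pre_at {adj : List (List Int)} {root : Int} (hp : Pre_tree_hash adj root)
    {u p : Int} (hfr : (u, p) ∈ pvR adj root) :
    (-(adj.length : Int) ≤ u ∧ u < adj.length) ∧
    pvH adj root (u, p) < pvC adj ∧
    (∀ v ∈ pvRow adj u, v ≠ p →
      (v, u) ∈ pvR adj root ∧ pvH adj root (v, u) < pvH adj root (u, p)) := by
  exact hp.2.2.2 (u, p) hfr

theorem good_child {adj : List (List Int)} {root : Int} (hp : Pre_tree_hash adj root)
    {u p : Int} (hfr : (u, p) ∈ pvR adj root) :
    ∀ v ∈ pvCh adj u p,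
      (v, u) ∈ pvR adj root ∧ pvH adj root (v, u) < pvH adj root (u, p) := by
  intro v hv
  have hv' := List.mem_filter.mp hv
  exact (pre_at hp hfr).2.2 v hv'.1 (by simpa using hv'.2)

theorem row_len_le (adj : List (List Int)) (u : Int) :
    (pvRow adj u).length ≤ pvC adj := by
  unfold pvRow pvC
  set i := if u < 0 then (u + adj.length).toNat else u.toNat with hi
  by_cases h : i < adj.length
  · have hmem : adj.getD i [] ∈ adj := by
      rw [List.getD_eq_getElem adj [] h]
      exact List.getElem_mem h
    have : (adj.getD i []).length ≤ (adj.map List.length).sum :=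
      List.single_le_sum (by intro x _; omega) _ (List.mem_map.mpr ⟨_, hmem, rfl⟩)
    omega
  · rw [List.getD_eq_default _ _ (by omega)]
    simp

-- ---- A-side: convergence, monotonicity, value shape ----

theorem dfsA_succ (adj : List (List Int)) (f : Nat) (u p : Int)
    (h0 : -(adj.length : Int) ≤ u) (h1 : u < adj.length) :
    dfsA adj (f + 1) u p =
      match gatherPf (fun v => dfsA adj f v u) (pvCh adj u p) with
      | none => none
      | some ch => some (pvFold ch) := by
  simp only [dfsA, pvRow_get h0 h1, kidsA_eq_gather]
  rfl

theorem dfs_some {adj : List (List Int)} {root : Int} (hp : Pre_tree_hash adj root) :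
    ∀ d : Nat, ∀ u p : Int, (u, p) ∈ pvR adj root → pvH adj root (u, p) ≤ d →
    ∃ h, dfsA adj (d + 1) u p = some h := by
  intro d
  induction d with
  | zero =>
    intro u p hfr hd
    obtain ⟨⟨h0, h1⟩, -, -⟩ := pre_at hp hfr
    have hch : pvCh adj u p = [] := by
      rw [List.eq_nil_iff_forall_not_mem]
      intro v hv
      have := (good_child hp hfr v hv).2
      omega
    rw [dfsA_succ adj 0 u p h0 h1, hch]
    exact ⟨pvFold [], rfl⟩
  | succ d ih =>
    intro u p hfr hd
    obtain ⟨⟨h0, h1⟩, -, -⟩ := pre_at hp hfr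
    rw [dfsA_succ adj (d + 1) u p h0 h1]
    obtain ⟨ys, hys⟩ := gatherPf_ex (l := pvCh adj u p)
      (fun v hv => ih v u (good_child hp hfr v hv).1
        (by have := (good_child hp hfr v hv).2; omega))
    rw [hys]
    exact ⟨pvFold ys, rfl⟩

theorem dfs_mono {adj : List (List Int)} :
    ∀ f f' : Nat, ∀ u p h, f ≤ f' → dfsA adj f u p = some h → dfsA adj f' u p = some h := by
  intro f
  induction f with
  | zero => intro f' u p h _ hx; simp [dfsA] at hx
  | succ f ih =>
    intro f' u p h hle hx
    obtain ⟨f'', rfl⟩ : ∃ f'', f' = f'' + 1 := ⟨f' - 1, by omega⟩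
    simp only [dfsA] at hx ⊢
    cases hrow : PySem.List.pyGet? adj u with
    | none => rw [hrow] at hx; simp at hx
    | some row =>
      simp only [hrow] at hx ⊢
      rw [kidsA_eq_gather] at hx ⊢
      cases hk : gatherPf (fun v => dfsA adj f v u) (row.filter (fun v => decide (v ≠ p))) with
      | none => rw [hk] at hx; simp at hx
      | some ch =>
        rw [hk] at hx
        rw [gatherPf_congr (fun v _ y hy => ih f'' v u y (by omega) hy) hk]
        exact hx

theorem dfs_conv {adj : List (List Int)} {root : Int} (hp : Pre_tree_hash adj root)
    {u p : Int} (hfr : (u, p) ∈ pvR adj root) :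
    dfsA adj (pvC adj + 1) u p = some (pvVal adj u p) := by
  have hk := (pre_at hp hfr).2.1
  obtain ⟨h, hh⟩ := dfs_some hp (pvC adj) u p hfr (by omega)
  simp [pvVal, hh]

theorem dfs_val_unfold {adj : List (List Int)} {root : Int} (hp : Pre_tree_hash adj root)
    {u p : Int} (hfr : (u, p) ∈ pvR adj root) :
    pvVal adj u p = pvFold ((pvCh adj u p).map (fun v => pvVal adj v u)) := by
  obtain ⟨⟨h0, h1⟩, hC, -⟩ := pre_at hp hfr
  have hch : ∀ v ∈ pvCh adj u p, dfsA adj (pvC adj) v u = some (pvVal adj v u) := by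
    intro v hv
    obtain ⟨hmem, hlt⟩ := good_child hp hfr v hv
    obtain ⟨h, hh⟩ := dfs_some hp (pvC adj - 1) v u hmem (by omega)
    have ha := dfs_mono (adj := adj) _ _ _ _ _
      (by omega : pvC adj - 1 + 1 ≤ pvC adj) hh
    have hb := dfs_mono (adj := adj) _ _ _ _ _
      (by omega : pvC adj - 1 + 1 ≤ pvC adj + 1) hh
    have hv2 : pvVal adj v u = h := by simp [pvVal, hb]
    rw [hv2]
    exact ha
  have h2 : dfsA adj (pvC adj + 1) u p =
      some (pvFold ((pvCh adj u p).map (fun v => pvVal adj v u))) := by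
    rw [dfsA_succ adj (pvC adj) u p h0 h1]
    rw [gatherPf_some_of (fun v => pvVal adj v u) hch]
  rw [dfs_conv hp hfr] at h2
  exact Option.some_injective _ h2

-- ---- B-side: expansion convergence, size, structure ----

theorem expF_zero (adj : List (List Int)) (fr : Int × Int) : expF adj 0 fr = none := by
  cases fr; rfl

theorem expF_succ (adj : List (List Int)) (d : Nat) (u p : Int) :
    expF adj (d + 1) (u, p) =
      match gatherPf (fun v => expF adj d (v, u)) (pvCh adj u p).reverse with
      | none => none
      | some ls => some ((u, p) :: ls.flatten) := rfl

theorem exp_some {adj : List (List Int)} {root : Int} (hp : Pre_tree_hash adj root) :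
    ∀ d : Nat, ∀ u p : Int, (u, p) ∈ pvR adj root → pvH adj root (u, p) ≤ d →
    ∃ l, expF adj (d + 1) (u, p) = some l := by
  intro d
  induction d with
  | zero =>
    intro u p hfr hd
    have hch : pvCh adj u p = [] := by
      rw [List.eq_nil_iff_forall_not_mem]
      intro v hv
      have := (good_child hp hfr v hv).2
      omega
    exact ⟨[(u, p)], by rw [expF_succ, hch]; rfl⟩
  | succ d ih =>
    intro u p hfr hd
    obtain ⟨ys, hys⟩ := gatherPf_ex (l := (pvCh adj u p).reverse)
      (fun v hv => ih v u (good_child hp hfr v (List.mem_reverse.mp hv)).1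
        (by have := (good_child hp hfr v (List.mem_reverse.mp hv)).2; omega))
    exact ⟨(u, p) :: ys.flatten, by rw [expF_succ, hys]⟩

theorem exp_mono {adj : List (List Int)} :
    ∀ f f' : Nat, ∀ fr l, f ≤ f' → expF adj f fr = some l → expF adj f' fr = some l := by
  intro f
  induction f with
  | zero => intro f' fr l _ hx; rw [expF_zero] at hx; simp at hx
  | succ f ih =>
    intro f' fr l hle hx
    obtain ⟨f'', rfl⟩ : ∃ f'', f' = f'' + 1 := ⟨f' - 1, by omega⟩
    obtain ⟨u, p⟩ := fr
    rw [expF_succ] at hx ⊢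
    cases hk : gatherPf (fun v => expF adj f (v, u)) (pvCh adj u p).reverse with
    | none => rw [hk] at hx; simp at hx
    | some ls =>
      rw [hk] at hx
      rw [gatherPf_congr (fun x _ y hy => ih f'' (x, u) y (by omega) hy) hk]
      exact hx

theorem exp_conv {adj : List (List Int)} {root : Int} (hp : Pre_tree_hash adj root)
    {u p : Int} (hfr : (u, p) ∈ pvR adj root) :
    expF adj (pvC adj + 1) (u, p) = some (pvExp adj (u, p)) := by
  have hk := (pre_at hp hfr).2.1
  obtain ⟨l, hl⟩ := exp_some hp (pvC adj) u p hfr (by omega)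
  simp [pvExp, hl]

theorem exp_unfold {adj : List (List Int)} {root : Int} (hp : Pre_tree_hash adj root)
    {u p : Int} (hfr : (u, p) ∈ pvR adj root) :
    pvExp adj (u, p) =
      (u, p) :: ((pvCh adj u p).reverse.map (fun v => pvExp adj (v, u))).flatten := by
  obtain ⟨-, hC, -⟩ := pre_at hp hfr
  have hch : ∀ v ∈ (pvCh adj u p).reverse,
      expF adj (pvC adj) (v, u) = some (pvExp adj (v, u)) := by
    intro v hv
    obtain ⟨hmem, hlt⟩ := good_child hp hfr v (List.mem_reverse.mp hv)
    obtain ⟨l, hl⟩ := exp_some hp (pvC adj - 1) v u hmem (by omega)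
    have ha := exp_mono (adj := adj) _ _ _ _
      (by omega : pvC adj - 1 + 1 ≤ pvC adj) hl
    have hb := exp_mono (adj := adj) _ _ _ _
      (by omega : pvC adj - 1 + 1 ≤ pvC adj + 1) hl
    have hv2 : pvExp adj (v, u) = l := by simp [pvExp, hb]
    rw [hv2]
    exact ha
  have h2 : expF adj (pvC adj + 1) (u, p) =
      some ((u, p) :: ((pvCh adj u p).reverse.map (fun v => pvExp adj (v, u))).flatten) := by
    rw [expF_succ]
    rw [gatherPf_some_of (fun v => pvExp adj (v, u)) hch]
  rw [exp_conv hp hfr] at h2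
  exact Option.some_injective _ h2

theorem exp_len {adj : List (List Int)} {root : Int} (hp : Pre_tree_hash adj root) :
    ∀ d : Nat, ∀ u p : Int, ∀ l, (u, p) ∈ pvR adj root →
    expF adj (d + 1) (u, p) = some l → l.length ≤ (pvC adj + 1) ^ (d + 1) := by
  intro d
  induction d with
  | zero =>
    intro u p l hfr hl
    rw [expF_succ] at hl
    cases hk : gatherPf (fun v => expF adj 0 (v, u)) (pvCh adj u p).reverse with
    | none => rw [hk] at hl; simp at hl
    | some ls =>
      rw [hk] at hl
      have hls : ls = [] := by
        rw [List.eq_nil_iff_forall_not_mem]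
        intro y hy
        obtain ⟨x, -, hx⟩ := gatherPf_mem_tgt hk y hy
        rw [expF_zero] at hx; simp at hx
      simp only [Option.some.injEq] at hl
      subst hl
      subst hls
      simp
  | succ d ih =>
    intro u p l hfr hl
    rw [expF_succ] at hl
    cases hk : gatherPf (fun v => expF adj (d + 1) (v, u)) (pvCh adj u p).reverse with
    | none => rw [hk] at hl; simp at hl
    | some ls =>
      rw [hk] at hl
      simp only [Option.some.injEq] at hl
      subst hl
      have hbound : ∀ y ∈ ls, y.length ≤ (pvC adj + 1) ^ (d + 1) := by
        intro y hy
        obtain ⟨x, hx, hgx⟩ := gatherPf_mem_tgt hk y hy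
        exact ih x u y (good_child hp hfr x (List.mem_reverse.mp hx)).1 hgx
      have hlslen : ls.length ≤ pvC adj := by
        rw [gatherPf_length hk, List.length_reverse]
        calc (pvCh adj u p).length ≤ (pvRow adj u).length := List.length_filter_le _ _
          _ ≤ pvC adj := row_len_le adj u
      have hsum : ls.flatten.length ≤ ls.length * ((pvC adj + 1) ^ (d + 1)) := by
        rw [List.length_flatten]
        have := List.sum_le_card_nsmul (ls.map List.length) ((pvC adj + 1) ^ (d + 1))
          (by intro x hx
              obtain ⟨y, hy, rfl⟩ := List.mem_map.mp hx
              exact hbound y hy)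
        simpa [smul_eq_mul] using this
      have hpow : (pvC adj + 1) ^ (d + 1 + 1) = (pvC adj + 1) ^ (d + 1) * (pvC adj + 1) :=
        pow_succ _ _
      have h1 : 1 ≤ (pvC adj + 1) ^ (d + 1) := Nat.one_le_pow _ _ (by omega)
      simp only [List.length_cons]
      nlinarith

theorem exp_allGood {adj : List (List Int)} {root : Int} (hp : Pre_tree_hash adj root) :
    ∀ d : Nat, ∀ u p : Int, ∀ l, (u, p) ∈ pvR adj root →
    expF adj (d + 1) (u, p) = some l →
    ∀ fr ∈ l, fr ∈ pvR adj root := by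
  intro d
  induction d with
  | zero =>
    intro u p l hfr hl fr hfrl
    rw [expF_succ] at hl
    cases hk : gatherPf (fun v => expF adj 0 (v, u)) (pvCh adj u p).reverse with
    | none => rw [hk] at hl; simp at hl
    | some ls =>
      rw [hk] at hl
      have hls : ls = [] := by
        rw [List.eq_nil_iff_forall_not_mem]
        intro y hy
        obtain ⟨x, -, hx⟩ := gatherPf_mem_tgt hk y hy
        rw [expF_zero] at hx; simp at hx
      simp only [Option.some.injEq] at hl
      subst hl
      subst hls
      simp only [List.flatten_nil, List.mem_singleton] at hfrl
      subst hfrl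
      exact hfr
  | succ d ih =>
    intro u p l hfr hl fr hfrl
    rw [expF_succ] at hl
    cases hk : gatherPf (fun v => expF adj (d + 1) (v, u)) (pvCh adj u p).reverse with
    | none => rw [hk] at hl; simp at hl
    | some ls =>
      rw [hk] at hl
      simp only [Option.some.injEq] at hl
      subst hl
      rcases List.mem_cons.mp hfrl with hfrl | hfrl
      · subst hfrl; exact hfr
      · obtain ⟨y, hy, hfy⟩ := List.mem_flatten.mp hfrl
        obtain ⟨x, hx, hgx⟩ := gatherPf_mem_tgt hk y hy
        exact ih x u y (good_child hp hfr x (List.mem_reverse.mp hx)).1 hgx fr hfy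

theorem selfC_append {adj : List (List Int)} {a b : List (Int × Int)}
    (ha : SelfC adj a) (hb : SelfC adj b) : SelfC adj (a ++ b) := by
  intro l1 fr l2 heq v hv
  rcases List.append_eq_append_iff.mp heq with ⟨a', ha1, ha2⟩ | ⟨c', hc1, hc2⟩
  · exact hb a' fr l2 ha2 v hv
  · cases c' with
    | nil =>
      simp only [List.nil_append] at hc2
      exact hb [] fr l2 (by simpa using hc2.symm) v hv
    | cons x t' =>
      simp only [List.cons_append, List.cons.injEq] at hc2
      obtain ⟨rfl, rfl⟩ := hc2
      exact List.mem_append_left _ (ha l1 fr t' hc1 v hv)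

theorem selfC_flatten {adj : List (List Int)} {ls : List (List (Int × Int))}
    (h : ∀ x ∈ ls, SelfC adj x) : SelfC adj ls.flatten := by
  induction ls with
  | nil =>
    intro l1 fr l2 heq
    simp only [List.flatten_nil] at heq
    exact absurd heq (by simp)
  | cons x rest ih =>
    simp only [List.flatten_cons]
    exact selfC_append (h x (by simp)) (ih (fun y hy => h y (by simp [hy])))

theorem exp_selfC {adj : List (List Int)} {root : Int} (hp : Pre_tree_hash adj root) :
    ∀ d : Nat, ∀ u p : Int, ∀ l, (u, p) ∈ pvR adj root →
    expF adj (d + 1) (u, p) = some l → SelfC adj l := by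
  intro d
  induction d with
  | zero =>
    intro u p l hfr hl
    rw [expF_succ] at hl
    cases hk : gatherPf (fun v => expF adj 0 (v, u)) (pvCh adj u p).reverse with
    | none => rw [hk] at hl; simp at hl
    | some ls =>
      rw [hk] at hl
      have hls : ls = [] := by
        rw [List.eq_nil_iff_forall_not_mem]
        intro y hy
        obtain ⟨x, -, hx⟩ := gatherPf_mem_tgt hk y hy
        rw [expF_zero] at hx; simp at hx
      have hch : pvCh adj u p = [] := by
        have hlen := gatherPf_length hk
        rw [hls] at hlen
        have h0 : (pvCh adj u p).length = 0 := by simpa using hlen.symm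
        exact List.eq_nil_of_length_eq_zero h0
      simp only [Option.some.injEq] at hl
      subst hl
      subst hls
      intro l1 fr l2 heq
      cases l1 with
      | nil =>
        simp only [List.flatten_nil, List.nil_append, List.cons.injEq] at heq
        obtain ⟨rfl, rfl⟩ := heq
        intro v hv
        rw [hch] at hv
        simp at hv
      | cons a l1' =>
        simp only [List.flatten_nil, List.cons_append, List.cons.injEq] at heq
        exact absurd heq.2 (by simp)
  | succ d ih =>
    intro u p l hfr hl
    rw [expF_succ] at hl
    cases hk : gatherPf (fun v => expF adj (d + 1) (v, u)) (pvCh adj u p).reverse with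
    | none => rw [hk] at hl; simp at hl
    | some ls =>
      rw [hk] at hl
      simp only [Option.some.injEq] at hl
      subst hl
      intro l1 fr l2 heq
      cases l1 with
      | nil =>
        simp only [List.nil_append, List.cons.injEq] at heq
        obtain ⟨rfl, rfl⟩ := heq
        intro v hv
        have hvr : v ∈ (pvCh adj u p).reverse := List.mem_reverse.mpr hv
        obtain ⟨y, hy, hgy⟩ := gatherPf_mem_src hk v hvr
        have hhead : (v, u) ∈ y := by
          rw [expF_succ] at hgy
          cases hk2 : gatherPf (fun w => expF adj d (w, v)) (pvCh adj v u).reverse with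
          | none => rw [hk2] at hgy; simp at hgy
          | some ls2 =>
            rw [hk2] at hgy
            simp only [Option.some.injEq] at hgy
            subst hgy
            simp
        exact List.mem_flatten.mpr ⟨y, hy, hhead⟩
      | cons a l1' =>
        simp only [List.cons_append, List.cons.injEq] at heq
        have hflat : SelfC adj ls.flatten := by
          refine selfC_flatten ?_
          intro y hy
          obtain ⟨x, hx, hgx⟩ := gatherPf_mem_tgt hk y hy
          exact ih x u y (good_child hp hfr x (List.mem_reverse.mp hx)).1 hgx
        exact hflat l1' fr l2 heq.2

-- ---- pass 1 and pass 2 correctness ----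

theorem pass1_succ (adj : List (List Int)) (f : Nat) (u p : Int)
    (rest ord : List (Int × Int)) (row : List Int)
    (hrow : PySem.List.pyGet? adj u = some row) :
    pass1 adj (f + 1) ((u, p) :: rest) ord =
      pass1 adj f (((row.filter (fun v => decide (v ≠ p))).map (fun v => (v, u))).reverse ++ rest)
        ((u, p) :: ord) := by
  simp only [pass1, hrow]

theorem pass1_run {adj : List (List Int)} {root : Int} (hp : Pre_tree_hash adj root) :
    ∀ f : Nat, ∀ stack ord : List (Int × Int),
    (∀ fr ∈ stack, fr ∈ pvR adj root) →
    (stack.flatMap (pvExp adj)).length ≤ f →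
    pass1 adj f stack ord = some (ord.reverse ++ stack.flatMap (pvExp adj)) := by
  intro f
  induction f with
  | zero =>
    intro stack ord hgood hlen
    cases stack with
    | nil => simp [pass1]
    | cons fr rest =>
      exfalso
      have hk := hgood fr (by simp)
      obtain ⟨u, p⟩ := fr
      have hu := exp_unfold hp hk
      have h1 : 1 ≤ (pvExp adj (u, p)).length := by rw [hu]; simp
      simp only [List.flatMap_cons, List.length_append] at hlen
      omega
  | succ f ih =>
    intro stack ord hgood hlen
    cases stack with
    | nil => simp [pass1]
    | cons fr rest =>
      obtain ⟨u, p⟩ := fr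
      have hk := hgood (u, p) (by simp)
      obtain ⟨⟨h0, h1⟩, -, -⟩ := pre_at hp hk
      rw [pass1_succ adj f u p rest ord (pvRow adj u) (pvRow_get h0 h1)]
      rw [show (pvRow adj u).filter (fun v => decide (v ≠ p)) = pvCh adj u p from rfl]
      have hS' : ∀ fr ∈ ((pvCh adj u p).map (fun v => (v, u))).reverse ++ rest,
          fr ∈ pvR adj root := by
        intro fr hfr
        rcases List.mem_append.mp hfr with hfr | hfr
        · rw [List.mem_reverse] at hfr
          obtain ⟨v, hv, rfl⟩ := List.mem_map.mp hfr
          exact (good_child hp hk v hv).1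
        · exact hgood fr (by simp [hfr])
      have hu := exp_unfold hp hk
      have hflat : ((((pvCh adj u p).map (fun v => (v, u))).reverse ++ rest).flatMap (pvExp adj))
          = ((pvCh adj u p).reverse.map (fun v => pvExp adj (v, u))).flatten
            ++ rest.flatMap (pvExp adj) := by
        rw [List.flatMap_append]
        congr 1
        rw [← List.map_reverse]
        rw [List.flatMap_map]
        rw [List.flatMap_def]
      have hlen' : (((((pvCh adj u p).map (fun v => (v, u))).reverse ++ rest).flatMap (pvExp adj))).length ≤ f := by
        rw [hflat]
        simp only [List.flatMap_cons, List.length_append] at hlen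
        rw [hu] at hlen
        simp only [List.length_cons] at hlen
        simp only [List.length_append]
        omega
      rw [ih _ _ hS' hlen']
      rw [hflat, List.flatMap_cons, hu]
      simp [List.append_assoc]

theorem pass2_run {adj : List (List Int)} {root : Int} (hp : Pre_tree_hash adj root) :
    ∀ m : List (Int × Int), ∀ d : PySem.Dict (Int × Int) Int,
    (∀ fr h, d.get? fr = some h → h = pvVal adj fr.1 fr.2) →
    (∀ fr ∈ m, fr ∈ pvR adj root) →
    (∀ m1 fr m2, m = m1 ++ fr :: m2 →
      ∀ v ∈ pvCh adj fr.1 fr.2, d.contains (v, fr.1) = true ∨ (v, fr.1) ∈ m1) →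
    ∃ d', pass2 adj m d = some d' ∧
      (∀ fr h, d'.get? fr = some h → h = pvVal adj fr.1 fr.2) ∧
      (∀ fr, d.contains fr = true → d'.contains fr = true) ∧
      (∀ fr ∈ m, d'.contains fr = true) := by
  intro m
  induction m with
  | nil =>
    intro d hcor hgood hclosed
    exact ⟨d, rfl, hcor, fun fr h => h, by simp⟩
  | cons fr0 rest ih =>
    intro d hcor hgood hclosed
    obtain ⟨u, p⟩ := fr0
    have hk := hgood (u, p) (by simp)
    obtain ⟨⟨h0, h1⟩, -, -⟩ := pre_at hp hk
    have hvals : ∀ v ∈ pvCh adj u p, d.get? (v, u) = some (pvVal adj v u) := by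
      intro v hv
      have hcont : d.contains (v, u) = true := by
        rcases hclosed [] (u, p) rest rfl v hv with h | h
        · exact h
        · simp at h
      rw [PySem.Dict.contains_eq_isSome_get?] at hcont
      obtain ⟨h, hh⟩ := Option.isSome_iff_exists.mp hcont
      rw [hh, hcor (v, u) h hh]
    have hstep : pass2 adj ((u, p) :: rest) d =
        pass2 adj rest (d.insert (u, p) (pvVal adj u p)) := by
      simp only [pass2, pvRow_get h0 h1]
      rw [gatherPf_eq_mapM,
        show (pvRow adj u).filter (fun v => decide (v ≠ p)) = pvCh adj u p from rfl,
        gatherPf_some_of (fun v => pvVal adj v u) hvals]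
      have hv2 : pvVal adj u p = pvFold ((pvCh adj u p).map (fun v => pvVal adj v u)) :=
        dfs_val_unfold hp hk
      rw [hv2]
      rfl
    rw [hstep]
    have hcor2 : ∀ fr h, (d.insert (u, p) (pvVal adj u p)).get? fr = some h →
        h = pvVal adj fr.1 fr.2 := by
      intro fr h hget
      by_cases hfr : fr = (u, p)
      · subst hfr
        rw [PySem.Dict.get?_insert_self] at hget
        exact (Option.some_injective _ hget).symm
      · rw [PySem.Dict.get?_insert, if_neg hfr] at hget
        exact hcor fr h hget
    have hclosed2 : ∀ m1 fr m2, rest = m1 ++ fr :: m2 → ∀ v ∈ pvCh adj fr.1 fr.2,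
        (d.insert (u, p) (pvVal adj u p)).contains (v, fr.1) = true ∨ (v, fr.1) ∈ m1 := by
      intro m1 fr m2 heq v hv
      rcases hclosed ((u, p) :: m1) fr m2 (by rw [heq]; rfl) v hv with h | h
      · left
        rw [PySem.Dict.contains_insert]
        simp [h]
      · rcases List.mem_cons.mp h with h | h
        · left
          rw [h]
          exact PySem.Dict.contains_insert_self _ _ _
        · right; exact h
    obtain ⟨d', hrun, hcor', hmono', hmem'⟩ :=
      ih _ hcor2 (fun fr hfr => hgood fr (by simp [hfr])) hclosed2
    refine ⟨d', hrun, hcor', ?_, ?_⟩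
    · intro fr h
      apply hmono'
      rw [PySem.Dict.contains_insert]
      simp [h]
    · intro fr hfr
      rcases List.mem_cons.mp hfr with h | h
      · subst h
        apply hmono'
        exact PySem.Dict.contains_insert_self _ _ _
      · exact hmem' fr h

-- ===== VERDICT (by name: the statement is the Claim_ definition above) =====
theorem tree_hash_spec : Claim_equal_tree_hash := by
  intro adj root hdom hpre
  unfold Spec_tree_hash
  have hgr : (root, -1) ∈ pvR adj root := hpre.2.2.1
  have hu := exp_unfold hpre hgr
  have hconv := exp_conv hpre hgr
  have hexplen : (pvExp adj (root, -1)).length ≤ (pvC adj + 1) ^ (pvC adj + 1) :=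
    exp_len hpre (pvC adj) root (-1) _ hgr hconv
  have h1 : pass1 adj ((pvC adj + 2) ^ (pvC adj + 2)) [(root, -1)] [] =
      some (pvExp adj (root, -1)) := by
    have := pass1_run hpre ((pvC adj + 2) ^ (pvC adj + 2)) [(root, -1)] []
      (by
        intro fr hfr
        simp only [List.mem_singleton] at hfr
        subst hfr
        exact hgr)
      (by
        simp only [List.flatMap_cons, List.flatMap_nil, List.append_nil]
        calc (pvExp adj (root, -1)).length
            ≤ (pvC adj + 1) ^ (pvC adj + 1) := hexplen
          _ ≤ (pvC adj + 2) ^ (pvC adj + 1) :=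
              Nat.pow_le_pow_left (by omega) _
          _ ≤ (pvC adj + 2) ^ (pvC adj + 2) :=
              Nat.pow_le_pow_right (by omega) (by omega))
    simpa using this
  have hself := exp_selfC hpre (pvC adj) root (-1) _ hgr hconv
  have hallg := exp_allGood hpre (pvC adj) root (-1) _ hgr hconv
  obtain ⟨d', hrun, hcor', hmono', hmem'⟩ :=
    pass2_run hpre (pvExp adj (root, -1)).reverse PySem.Dict.empty
      (by
        intro fr h hget
        rw [PySem.Dict.get?_empty] at hget
        cases hget)
      (fun fr hfr => hallg fr (List.mem_reverse.mp hfr))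
      (by
        intro m1 fr m2 heq v hv
        right
        have hsplit : pvExp adj (root, -1) = m2.reverse ++ fr :: m1.reverse := by
          have hrev : (pvExp adj (root, -1)).reverse.reverse = (m1 ++ fr :: m2).reverse := by
            rw [heq]
          simpa [List.reverse_append] using hrev
        exact List.mem_reverse.mp (hself m2.reverse fr m1.reverse hsplit v hv))
  have hmemroot : (root, -1) ∈ (pvExp adj (root, -1)).reverse := by
    rw [List.mem_reverse, hu]
    simp
  have hcont := hmem' (root, -1) hmemroot
  rw [PySem.Dict.contains_eq_isSome_get?] at hcont
  obtain ⟨h, hget⟩ := Option.isSome_iff_exists.mp hcont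
  have hval : h = pvVal adj root (-1) := hcor' (root, -1) h hget
  show tree_hash adj root = tree_hash_alt adj root
  unfold tree_hash_alt
  rw [h1]
  simp only [hrun, hget, hval]
  rfl
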